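-- pv_equiv track=rewrite | github.com/malikinss/portfolio | Python/Just Python/beegeek/Beegeek Python For Advanced/4_4_1.py | get_even_row
-- ===== SOURCE A (Python) =====
-- def get_even_row(columns):
--     row = []
--
--     for j in range(columns):
--         if 0 == j % 2:
--             row.append(".")
--         else:
--             row.append("*")
--
--     return row
-- ===== SOURCE B (Python) =====
-- def get_even_row(columns):
--     n = max(columns, 0)
--     return ([".", "*"] * ((n + 1) // 2))[:n]
-- ===== Notes on version B (the rewrite author's own statement) =====
-- stated objective: idiomatic
-- what changed: B builds the row by repeating the two-element tile ['.', '*'] and slicing to length max(columns, 0), instead of A's loop that appends one character per index based on its parity.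
import Mathlib
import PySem

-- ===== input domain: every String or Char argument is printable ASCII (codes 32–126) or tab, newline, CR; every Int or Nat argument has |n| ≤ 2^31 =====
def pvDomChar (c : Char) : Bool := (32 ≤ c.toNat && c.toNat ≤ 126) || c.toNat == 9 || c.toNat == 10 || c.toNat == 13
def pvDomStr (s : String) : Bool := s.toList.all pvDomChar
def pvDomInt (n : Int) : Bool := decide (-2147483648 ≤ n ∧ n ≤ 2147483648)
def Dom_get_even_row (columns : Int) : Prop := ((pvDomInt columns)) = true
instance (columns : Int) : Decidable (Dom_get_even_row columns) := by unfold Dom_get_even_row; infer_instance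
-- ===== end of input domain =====

-- B builds the row by tiling [".", "*"] and truncating instead of A's per-index parity loop (objective: idiomatic).

-- ===== PORT A =====
def get_even_row (columns : Int) : List String :=
  (PySem.List.pyRange 0 columns 1).foldl
    (fun row j => if 0 == PySem.Int.mod j 2 then row ++ ["."] else row ++ ["*"]) []

-- ===== PORT B =====
def get_even_row_alt (columns : Int) : List String :=
  let n : Int := max columns 0
  PySem.List.slice
    (List.flatten (List.replicate (PySem.Int.floordiv (n + 1) 2).toNat [".", "*"]))
    none (some n)

-- ===== PRECONDITION & SPEC =====
def Spec_get_even_row (columns : Int) (out : List String) : Prop := out = get_even_row_alt columns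
instance (columns : Int) (out : List String) : Decidable (Spec_get_even_row columns out) := by unfold Spec_get_even_row; infer_instance

-- ===== CLAIM (what is proved, stated in full; the proofs are below) =====
def Claim_equal_get_even_row : Prop := ∀ (columns : Int), Dom_get_even_row columns → Spec_get_even_row columns (get_even_row columns)

-- ===== LEMMAS AND PROOFS =====

def pvCell (k : Nat) : String := if k % 2 = 0 then "." else "*"

theorem pvFoldl_append (xs : List Int) (init : List String) :
    xs.foldl (fun row j => if 0 == PySem.Int.mod j 2 then row ++ ["."] else row ++ ["*"]) init
      = init ++ xs.map (fun j => if 0 == PySem.Int.mod j 2 then "." else "*") := by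
  induction xs generalizing init with
  | nil => simp
  | cons x xs ih =>
    simp only [List.foldl_cons, List.map_cons]
    rw [ih]
    split <;> simp

theorem pvFlatten_replicate (k : Nat) :
    List.flatten (List.replicate k [(".":String), "*"]) = (List.range (2 * k)).map pvCell := by
  induction k with
  | zero => simp
  | succ k ih =>
    have h2 : 2 * (k + 1) = 2 + 2 * k := by ring
    rw [List.replicate_succ, List.flatten_cons, ih, h2, List.range_add, List.map_append,
      List.map_map]
    have hfun : (pvCell ∘ fun x => 2 + x) = pvCell := by
      funext x; simp [pvCell, Function.comp, Nat.add_mod_left]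
    rw [hfun]
    rfl

theorem pvA_eq (m : Nat) :
    get_even_row (m : Int) = (List.range m).map pvCell := by
  unfold get_even_row
  rw [pvFoldl_append, PySem.List.pyRange_one]
  simp only [Int.sub_zero, Int.toNat_natCast, List.map_map, List.nil_append]
  apply List.map_congr_left
  intro k _
  have hmod : PySem.Int.mod ((k : Nat) : Int) 2 = ((k % 2 : Nat) : Int) := by
    rw [PySem.Int.mod_eq_emod_of_pos (show (0:Int) < 2 by omega)]; omega
  by_cases h : k % 2 = 0
  · simp [Function.comp, pvCell, h]
    omega
  · simp [Function.comp, pvCell, h]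
    omega

theorem pvB_eq (m : Nat) :
    get_even_row_alt (m : Int) = (List.range m).map pvCell := by
  unfold get_even_row_alt
  have hmax : max ((m : Nat) : Int) 0 = ((m : Nat) : Int) := by omega
  simp only [hmax]
  have hdiv : PySem.Int.floordiv ((m : Nat) + 1 : Int) 2 = (((m + 1) / 2 : Nat) : Int) := by
    rw [PySem.Int.floordiv_eq_ediv_of_pos (show (0:Int) < 2 by omega)]; omega
  rw [hdiv, Int.toNat_natCast, pvFlatten_replicate, PySem.List.slice_to_natCast,
    ← List.map_take, List.take_range]
  have hmin : min m (2 * ((m + 1) / 2)) = m := by omega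
  rw [hmin]

-- ===== VERDICT (by name: the statement is the Claim_ definition above) =====
theorem get_even_row_spec : Claim_equal_get_even_row := by
  intro columns _
  unfold Spec_get_even_row
  by_cases h : columns ≤ 0
  · have hA : get_even_row columns = [] := by
      unfold get_even_row
      rw [PySem.List.pyRange_one_eq_nil h]
      rfl
    have hB : get_even_row_alt columns = [] := by
      unfold get_even_row_alt
      have : max columns 0 = 0 := by omega
      simp [this, PySem.List.slice]
    rw [hA, hB]
  · obtain ⟨m, hm⟩ : ∃ m : Nat, columns = (m : Int) := ⟨columns.toNat, by omega⟩

    rw [hm, pvA_eq, pvB_eq]
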